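-- pv_equiv track=rewrite | github.com/jianiM/pMHChat | comprison_experiments/MHCAttnNet/protvec_coding.py | split_ngrams
-- ===== SOURCE A (Python) =====
-- def split_ngrams(seq, n):
--     """
--     Split sequence into non-overlapping n-grams
--     'ATSKLGH' --> [['ATS','KLG'],['TSK','LGH'],['SKL']]
--     """
--     kmers = list()
--     for i in range(n):
--         kmers.append(zip(*[iter(seq[i:])]*n))
--     str_ngrams = list()
--     for ngrams in kmers:
--         x = list()
--         for ngram in ngrams:
--             x.append("".join(ngram))
--         str_ngrams.append(x)
--     return str_ngrams
-- ===== SOURCE B (Python) =====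
-- def split_ngrams(seq, n):
--     if n <= 0:
--         return []
--     buckets = [[] for _ in range(n)]
--     for j in range(len(seq) - n + 1):
--         buckets[j % n].append("".join(seq[j:j+n]))
--     return buckets
-- ===== Notes on version B (the rewrite author's own statement) =====
-- stated objective: simpler
-- what changed: Replaces A's n-fold zip-of-shared-iterators construction (one full re-scan of seq per offset, then a second nested join pass) with a single linear scan over start positions that slices each n-gram once and distributes it to buckets[j % n].
import Mathlib
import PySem

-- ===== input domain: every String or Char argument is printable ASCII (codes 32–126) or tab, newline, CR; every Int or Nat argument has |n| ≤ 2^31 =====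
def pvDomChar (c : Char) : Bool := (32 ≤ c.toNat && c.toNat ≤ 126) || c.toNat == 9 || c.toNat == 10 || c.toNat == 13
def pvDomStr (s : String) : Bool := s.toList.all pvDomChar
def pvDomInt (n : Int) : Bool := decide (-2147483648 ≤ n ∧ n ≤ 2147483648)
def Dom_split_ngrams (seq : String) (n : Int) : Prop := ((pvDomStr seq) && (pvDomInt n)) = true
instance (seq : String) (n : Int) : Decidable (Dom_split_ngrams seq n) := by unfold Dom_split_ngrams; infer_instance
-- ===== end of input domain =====

-- B replaces A's n shifted zip-of-shared-iterators scans (plus a second join pass) by one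
-- linear scan over start positions that distributes each n-gram to buckets[j % n]: one pass, simpler.

-- ===== PORT A =====
-- zip(*[iter(l)]*n): successive non-overlapping chunks of size n, dropping any trailing partial chunk.
def pvChunks (l : List Char) (n : Nat) : List (List Char) :=
  if _h : 0 < n ∧ n ≤ l.length then
    l.take n :: pvChunks (l.drop n) n
  else []
termination_by l.length
decreasing_by simp; omega

def split_ngrams (seq : String) (n : Int) : List (List String) :=
  -- kmers: for i in range(n): zip(*[iter(seq[i:])]*n); then join each ngram tuple
  ((PySem.List.pyRange 0 n 1).map (fun i => pvChunks (seq.toList.drop i.toNat) n.toNat)).map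
    (fun ngrams => ngrams.map (fun g => String.ofList g))

-- ===== PORT B =====
def split_ngrams_alt (seq : String) (n : Int) : List (List String) :=
  if n ≤ 0 then []
  else
    (PySem.List.pyRange 0 ((seq.toList.length : Int) - n + 1) 1).foldl
      (fun bs j =>
        bs.modify (PySem.Int.mod j n).toNat
          (fun b => b ++ [String.ofList (PySem.List.slice seq.toList (some j) (some (j + n)))]))
      (List.replicate n.toNat [])

-- ===== PRECONDITION & SPEC =====
def Spec_split_ngrams (seq : String) (n : Int) (out : List (List String)) : Prop := out = split_ngrams_alt seq n
instance (seq : String) (n : Int) (out : List (List String)) : Decidable (Spec_split_ngrams seq n out) := by unfold Spec_split_ngrams; infer_instance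

-- ===== CLAIM (what is proved, stated in full; the proofs are below) =====
def Claim_equal_split_ngrams : Prop := ∀ (seq : String) (n : Int), Dom_split_ngrams seq n → Spec_split_ngrams seq n (split_ngrams seq n)

-- ===== LEMMAS AND PROOFS =====

-- start positions i, i+(k+1), i+2(k+1), … that are < m
def pvStarts (i m k : Nat) : List Nat :=
  if h : i < m then i :: pvStarts (i + (k + 1)) m k else []
termination_by m - i
decreasing_by omega

lemma pvStarts_succ (i m k : Nat) :
    pvStarts i (m + 1) k = pvStarts i m k ++ (if i ≤ m ∧ m % (k + 1) = i % (k + 1) then [m] else []) := by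
  by_cases hi : i < m + 1
  · rw [pvStarts, dif_pos hi]
    by_cases him : i < m
    · rw [pvStarts_succ (i + (k + 1)) m k]
      have hunf : pvStarts i m k = i :: pvStarts (i + (k + 1)) m k := by
        rw [pvStarts]; rw [dif_pos him]
      rw [hunf]
      have hcond : (i + (k + 1) ≤ m ∧ m % (k + 1) = (i + (k + 1)) % (k + 1)) ↔
          (i ≤ m ∧ m % (k + 1) = i % (k + 1)) := by
        rw [Nat.add_mod_right]
        constructor
        · rintro ⟨h1, h2⟩; exact ⟨by omega, h2⟩
        · rintro ⟨h1, h2⟩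
          refine ⟨?_, h2⟩
          have hdvd : (k + 1) ∣ (m - i) :=
            (Nat.modEq_iff_dvd' (by omega : i ≤ m)).mp h2.symm
          have : k + 1 ≤ m - i := Nat.le_of_dvd (by omega) hdvd
          omega
      simp only [hcond, List.cons_append]
    · -- i = m
      have him' : i = m := by omega
      subst him'
      have h2 : pvStarts (i + (k + 1)) (i + 1) k = [] := by
        rw [pvStarts, dif_neg (by omega)]
      rw [h2]
      have h3 : pvStarts i i k = [] := by
        rw [pvStarts, dif_neg (by omega)]
      rw [h3]
      simp
  · -- i ≥ m + 1
    have h1 : pvStarts i (m + 1) k = [] := by rw [pvStarts, dif_neg (by omega)]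
    have h2 : pvStarts i m k = [] := by rw [pvStarts, dif_neg (by omega)]
    have h3 : ¬(i ≤ m ∧ m % (k + 1) = i % (k + 1)) := by
      intro ⟨h, _⟩; omega
    rw [h1, h2, if_neg h3]; rfl
termination_by m - i
decreasing_by omega

lemma filter_range_eq_pvStarts (m k t : Nat) (ht : t < k + 1) :
    (List.range m).filter (fun (j : Nat) => (PySem.Int.mod ((j : Nat) : Int) ((k : Int) + 1)).toNat = t) = pvStarts t m k := by
  induction m with
  | zero => rw [pvStarts]; simp
  | succ m ih =>
    rw [List.range_succ, List.filter_append, ih, pvStarts_succ]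
    congr 1
    have hcast : ((k : Int) + 1) = ((k + 1 : Nat) : Int) := by push_cast; ring
    simp only [List.filter, hcast, PySem.Int.mod_natCast, Int.toNat_natCast]
    have hiff : (m % (k + 1) = t) ↔ (t ≤ m ∧ m % (k + 1) = t % (k + 1)) := by
      constructor
      · intro h
        have hle := Nat.mod_le m (k + 1)
        refine ⟨by omega, ?_⟩
        rw [h]
        exact (Nat.mod_eq_of_lt ht).symm
      · rintro ⟨h1, h2⟩
        rw [h2]
        exact Nat.mod_eq_of_lt ht
    by_cases h : m % (k + 1) = t
    · rw [if_pos (hiff.mp h)]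
      simp [h]
    · rw [if_neg (fun hc => h (hiff.mpr hc))]
      simp [h]

lemma pvChunks_eq_map_starts (L : List Char) (k : Nat) (i : Nat) :
    pvChunks (L.drop i) (k + 1) =
      (pvStarts i (L.length + 1 - (k + 1)) k).map (fun j => (L.drop j).take (k + 1)) := by
  rw [pvChunks, pvStarts]
  by_cases h : i < L.length + 1 - (k + 1)
  · have hlen : k + 1 ≤ (L.drop i).length := by simp; omega
    rw [dif_pos ⟨by omega, hlen⟩, dif_pos h]
    rw [List.drop_drop]
    rw [pvChunks_eq_map_starts L k (i + (k + 1))]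
    simp only [List.map_cons]
  · have hlen : ¬(0 < k + 1 ∧ k + 1 ≤ (L.drop i).length) := by
      rw [List.length_drop]; omega
    rw [dif_neg hlen, dif_neg h]
    rfl
termination_by L.length - i
decreasing_by omega

-- bucket contents after the distributing fold
lemma foldl_buckets {α : Type} (g : Nat → α) (f : Nat → Nat) :
    ∀ (js : List Nat) (bs : List (List α)), (∀ j ∈ js, f j < bs.length) →
      ∀ t (ht : t < bs.length),
      ((js.foldl (fun bs j => bs.modify (f j) (fun b => b ++ [g j])) bs).length = bs.length) ∧
      ∀ (h' : t < (js.foldl (fun bs j => bs.modify (f j) (fun b => b ++ [g j])) bs).length),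
      (js.foldl (fun bs j => bs.modify (f j) (fun b => b ++ [g j])) bs)[t] =
        bs[t] ++ (js.filter (fun j => f j = t)).map g := by
  intro js
  induction js with
  | nil => intro bs _ t ht; simp
  | cons j js ih =>
    intro bs hmem t ht
    simp only [List.foldl_cons]
    have hlen : (bs.modify (f j) (fun b => b ++ [g j])).length = bs.length := List.length_modify ..
    obtain ⟨hl, hv⟩ := ih (bs.modify (f j) (fun b => b ++ [g j]))
      (by intro x hx; rw [hlen]; exact hmem x (List.mem_cons_of_mem _ hx)) t (by omega)
    refine ⟨by omega, ?_⟩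
    intro h'
    rw [hv (by omega)]
    rw [List.getElem_modify]
    by_cases hft : f j = t
    · simp [hft, List.filter]
    · simp [hft, List.filter]

lemma split_ngrams_eq_alt (seq : String) (n : Int) : split_ngrams seq n = split_ngrams_alt seq n := by
  by_cases hn : n ≤ 0
  · unfold split_ngrams split_ngrams_alt
    rw [if_pos hn]
    simp [PySem.List.pyRange_one]
    omega
  · obtain ⟨k, hk⟩ : ∃ k : Nat, n = (k : Int) + 1 := ⟨n.toNat - 1, by omega⟩
    subst hk
    unfold split_ngrams split_ngrams_alt
    rw [if_neg hn]
    have hcast : ((k : Int) + 1) = ((k + 1 : Nat) : Int) := by push_cast; ring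
    have hm : ((((seq.toList.length : Int)) - ((k : Int) + 1) + 1) - 0).toNat =
        seq.toList.length + 1 - (k + 1) := by omega
    have hn1 : (((k : Int) + 1) - 0).toNat = k + 1 := by omega
    have hrepl : (((k : Int) + 1)).toNat = k + 1 := by omega
    rw [PySem.List.pyRange_one, PySem.List.pyRange_one, hm, hn1, hrepl]
    rw [List.foldl_map]
    rw [PySem.List.foldl_congr_mem _ _
      (fun (bs : List (List String)) (j : Nat) =>
        bs.modify (PySem.Int.mod ((j : Nat) : Int) ((k : Int) + 1)).toNat
          (fun b => b ++ [String.ofList ((seq.toList.drop j).take (k + 1))])) _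
      (by
        intro bs j _
        simp only [zero_add, hcast, PySem.List.slice_natCast_add])]
    have hmemlt : ∀ j ∈ List.range (seq.toList.length + 1 - (k + 1)),
        (PySem.Int.mod ((j : Nat) : Int) ((k : Int) + 1)).toNat <
          (List.replicate (k + 1) ([] : List String)).length := by
      intro j _
      rw [hcast, PySem.Int.mod_natCast]
      simp only [Int.toNat_natCast, List.length_replicate]
      exact Nat.mod_lt _ (by omega)
    apply List.ext_getElem
    · simp only [List.length_map, List.length_range]
      have hlf := (foldl_buckets
        (fun j => String.ofList ((seq.toList.drop j).take (k + 1)))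
        (fun j => (PySem.Int.mod ((j : Nat) : Int) ((k : Int) + 1)).toNat)
        (List.range (seq.toList.length + 1 - (k + 1))) (List.replicate (k + 1) []) hmemlt 0
        (by simp)).1
      simp only [List.length_replicate] at hlf
      exact hlf.symm
    · intro t h1 h2
      have htk : t < k + 1 := by simpa using h1
      obtain ⟨hl, hv⟩ := foldl_buckets
        (fun j => String.ofList ((seq.toList.drop j).take (k + 1)))
        (fun j => (PySem.Int.mod ((j : Nat) : Int) ((k : Int) + 1)).toNat)
        (List.range (seq.toList.length + 1 - (k + 1))) (List.replicate (k + 1) []) hmemlt t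
        (by simpa using htk)
      rw [hv h2]
      simp only [List.getElem_map, List.getElem_range, List.getElem_replicate, List.nil_append]
      rw [show ((0 : Int) + (t : Nat)).toNat = t from by omega]
      rw [pvChunks_eq_map_starts seq.toList k t,
        ← filter_range_eq_pvStarts (seq.toList.length + 1 - (k + 1)) k t htk]
      rw [List.map_map]
      rfl

-- ===== VERDICT (by name: the statement is the Claim_ definition above) =====
theorem split_ngrams_spec : Claim_equal_split_ngrams := by
  intro seq n _
  unfold Spec_split_ngrams
  exact split_ngrams_eq_alt seq n
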